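-- pv_equiv track=rewrite | github.com/jiuhonglaugh/aoam | bin/azkaban.py | getExe
-- ===== SOURCE A (Python) =====
-- def getExe(keys, dicts):
--     for key in keys:
--         key = key.split(':')[0]
--         if key in dicts:
--             dicts[key] = dicts[key] + ',AzkabanExecutorServer'
--         else:
--             dicts[key] = 'AzkabanExecutorServer'
--     return dicts
-- ===== SOURCE B (Python) =====
-- def getExe(keys, dicts):
--     counts = {}
--     for key in keys:
--         p = key.split(':')[0]
--         counts[p] = counts.get(p, 0) + 1
--     for p, n in counts.items():
--         if p in dicts:
--             dicts[p] = dicts[p] + ',AzkabanExecutorServer' * n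
--         else:
--             dicts[p] = ','.join(['AzkabanExecutorServer'] * n)
--     return dicts
-- ===== Notes on version B (the rewrite author's own statement) =====
-- stated objective: alternative
-- what changed: Instead of A's per-key loop that appends one tag per occurrence, B first builds a frequency table of prefixes (one counting pass, first-seen order), then does a second differently-shaped pass over the distinct prefixes only, performing one bulk update per prefix: an existing entry gets ',Tag'*n appended, a new entry gets ','.join(['Tag']*n).
import Mathlib
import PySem

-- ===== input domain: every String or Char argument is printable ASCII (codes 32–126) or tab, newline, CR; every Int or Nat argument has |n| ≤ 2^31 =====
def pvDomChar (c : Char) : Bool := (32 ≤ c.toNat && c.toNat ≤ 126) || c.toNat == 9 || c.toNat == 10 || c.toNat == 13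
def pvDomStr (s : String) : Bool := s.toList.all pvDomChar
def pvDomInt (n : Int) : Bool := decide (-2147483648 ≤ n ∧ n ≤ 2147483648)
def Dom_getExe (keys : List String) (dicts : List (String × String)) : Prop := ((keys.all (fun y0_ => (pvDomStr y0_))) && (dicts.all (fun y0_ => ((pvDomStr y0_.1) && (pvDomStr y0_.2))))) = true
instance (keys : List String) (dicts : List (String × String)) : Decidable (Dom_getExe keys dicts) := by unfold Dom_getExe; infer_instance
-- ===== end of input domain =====

-- ===== PORT A =====

-- B replaces A's per-occurrence loop by a distinct-prefix pass with one bulk string update per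
-- prefix (alternative decomposition, same cost class). Both A and B mutate the argument dict in
-- place in Python; the equivalence proved here is about the returned dict's items.

-- ===== PORT A =====
-- key.split(':')[0] — split? with sep ":" (never none since ":" ≠ ""), [0] total since split is nonempty
def pvPrefix (s : String) : String := (((PySem.Str.split? s ":").getD []).headD "")

def pvStepA (d : PySem.Dict String String) (k : String) : PySem.Dict String String :=
  if d.contains k then d.insert k (d.getD k "" ++ ",AzkabanExecutorServer")
  else d.insert k "AzkabanExecutorServer"

def getExe (keys : List String) (dicts : List (String × String)) : List (String × String) :=
  (keys.foldl (fun d key => pvStepA d (pvPrefix key)) (PySem.Dict.ofList dicts)).items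

-- ===== PORT B =====
-- ',AzkabanExecutorServer' * n  (Python string repetition)
def pvRep (n : Nat) : String := PySem.Str.join "" (List.replicate n ",AzkabanExecutorServer")

-- one bulk update for a prefix p occurring n times
def pvStepB2 (d : PySem.Dict String String) (pr : String × Int) : PySem.Dict String String :=
  if d.contains pr.1 then d.insert pr.1 (d.getD pr.1 "" ++ pvRep pr.2.toNat)
  else d.insert pr.1 (PySem.Str.join "," (List.replicate pr.2.toNat "AzkabanExecutorServer"))

def getExe_alt (keys : List String) (dicts : List (String × String)) : List (String × String) :=
  let counts : PySem.Dict String Int :=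
    keys.foldl (fun c key => let p := pvPrefix key; c.insert p (c.getD p 0 + 1)) PySem.Dict.empty
  (counts.items.foldl pvStepB2 (PySem.Dict.ofList dicts)).items

-- ===== PRECONDITION & SPEC =====
def Spec_getExe (keys : List String) (dicts : List (String × String)) (out : List (String × String)) : Prop := out = getExe_alt keys dicts
instance (keys : List String) (dicts : List (String × String)) (out : List (String × String)) : Decidable (Spec_getExe keys dicts out) := by unfold Spec_getExe; infer_instance

-- ===== CLAIM (what is proved, stated in full; the proofs are below) =====
def Claim_equal_getExe : Prop := ∀ (keys : List String) (dicts : List (String × String)), Dom_getExe keys dicts → Spec_getExe keys dicts (getExe keys dicts)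

-- ===== LEMMAS AND PROOFS =====

-- the common characterisation of both results' items
def pvF (P : List String) (d : PySem.Dict String String) : List (String × String) :=
  d.items.map (fun kv => (kv.1, kv.2 ++ pvRep (P.count kv.1)))
  ++ (PySem.List.dedup (P.filter (fun p => !(d.contains p)))).map
       (fun p => (p, "AzkabanExecutorServer" ++ pvRep (P.count p - 1)))

def pvStepB (P : List String) (d : PySem.Dict String String) (p : String) : PySem.Dict String String :=
  let n := P.count p
  if d.contains p then d.insert p (d.getD p "" ++ pvRep n)
  else d.insert p (PySem.Str.join "," (List.replicate n "AzkabanExecutorServer"))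

theorem pvIntercalate_nil (ls : List (List Char)) : List.intercalate [] ls = ls.flatten := by
  induction ls with
  | nil => rfl
  | cons a l ih => cases l <;> simp_all [List.intercalate, List.intersperse]

theorem pvRep_zero : pvRep 0 = "" := rfl

theorem pvIntercalate_cons (sep x y : List Char) (t : List (List Char)) :
    List.intercalate sep (x :: y :: t) = x ++ sep ++ List.intercalate sep (y :: t) := by
  simp [List.intercalate, List.intersperse]

theorem pvRep_succ (n : Nat) : pvRep (n + 1) = ",AzkabanExecutorServer" ++ pvRep n := by
  rw [← String.toList_inj]
  simp [pvRep, PySem.Str.join, PySem.Chars.join, show ("".toList) = ([] : List Char) from rfl,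
    pvIntercalate_nil, List.replicate_succ]

theorem pvAppend_empty (s : String) : s ++ "" = s := by simp

theorem pvJoin_cons (a b : String) (l : List String) :
    PySem.Str.join "," (a :: b :: l) = a ++ "," ++ PySem.Str.join "," (b :: l) := by
  rw [← String.toList_inj]
  simp [PySem.Str.join, PySem.Chars.join, pvIntercalate_cons]

theorem pvJoinC_succ (n : Nat) :
    PySem.Str.join "," (List.replicate (n + 1) "AzkabanExecutorServer")
      = "AzkabanExecutorServer" ++ pvRep n := by
  induction n with
  | zero =>
    simp [PySem.Str.join, PySem.Chars.join, List.intercalate, pvRep_zero]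
  | succ n ih =>
    rw [show List.replicate (n + 1 + 1) "AzkabanExecutorServer"
          = "AzkabanExecutorServer" :: "AzkabanExecutorServer" :: List.replicate n "AzkabanExecutorServer" by
            simp [List.replicate_succ],
        pvJoin_cons,
        show ("AzkabanExecutorServer" :: List.replicate n "AzkabanExecutorServer")
          = List.replicate (n + 1) "AzkabanExecutorServer" from (List.replicate_succ ..).symm,
        ih, pvRep_succ, show (",AzkabanExecutorServer" : String) = "," ++ "AzkabanExecutorServer" from rfl]
    simp only [String.append_assoc]

theorem pvFoldl_add_absorb (l : List String) (s : PySem.Set String) (p : String) (hp : p ∈ s) :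
    l.foldl PySem.Set.add s = (l.filter (fun x => x != p)).foldl PySem.Set.add s := by
  induction l generalizing s with
  | nil => rfl
  | cons x l ih =>
    by_cases hx : x = p
    · subst hx
      have h1 : PySem.Set.add s x = s := by simp [PySem.Set.add, hp]
      have h2 : (x :: l).filter (fun y => y != x) = l.filter (fun y => y != x) := by simp
      rw [List.foldl_cons, h1, h2]
      exact ih s hp
    · have h2 : (x :: l).filter (fun y => y != p) = x :: l.filter (fun y => y != p) := by
        simp [hx]
      rw [List.foldl_cons, h2, List.foldl_cons]
      exact ih (s.add x) (by by_cases h : x ∈ s <;> simp [PySem.Set.add, h, hp])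

theorem pvFoldl_add_cons (l : List String) (s : PySem.Set String) (p : String) (hp : p ∉ l) :
    l.foldl PySem.Set.add (p :: s) = p :: l.foldl PySem.Set.add s := by
  induction l generalizing s with
  | nil => rfl
  | cons x l ih =>
    have hxp : x ≠ p := fun h => hp (h ▸ List.mem_cons_self)
    have hcons : PySem.Set.add (p :: s) x = p :: PySem.Set.add s x := by
      by_cases h : x ∈ s
      · simp [PySem.Set.add, h, hxp]
      · simp [PySem.Set.add, h, hxp]
    rw [List.foldl_cons, hcons, ih _ (fun h => hp (List.mem_cons_of_mem _ h)), List.foldl_cons]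

theorem pvDedup_cons (p : String) (l : List String) :
    PySem.List.dedup (p :: l) = p :: PySem.List.dedup (l.filter (fun x => x != p)) := by
  rw [PySem.List.dedup_eq_ofList, PySem.Set.ofList_eq_foldl, List.foldl_cons]
  have h1 : PySem.Set.add ([] : PySem.Set String) p = [p] := by simp [PySem.Set.add]
  rw [h1, pvFoldl_add_absorb l [p] p (List.mem_singleton.mpr rfl),
    show ([p] : PySem.Set String) = p :: [] from rfl, pvFoldl_add_cons _ _ _ (by simp),
    PySem.List.dedup_eq_ofList, PySem.Set.ofList_eq_foldl]

theorem pvFoldl_add_filter (q : String → Bool) (l : List String) (s : PySem.Set String) :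
    (l.filter q).foldl PySem.Set.add (s.filter q) = (l.foldl PySem.Set.add s).filter q := by
  induction l generalizing s with
  | nil => rfl
  | cons x l ih =>
    by_cases hq : q x = true
    · have hmem : x ∈ s.filter q ↔ x ∈ s := by
        constructor
        · exact fun h => (List.mem_filter.mp h).1
        · exact fun h => List.mem_filter.mpr ⟨h, hq⟩
      have hadd : PySem.Set.add (s.filter q) x = (PySem.Set.add s x).filter q := by
        by_cases hm : x ∈ s
        · simp [PySem.Set.add, hm, hmem.mpr hm]
        · have : x ∉ s.filter q := fun h => hm (hmem.mp h)
          simp [PySem.Set.add, hm, this, List.filter_append, hq]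
      have hfc : (x :: l).filter q = x :: l.filter q := by simp [hq]
      rw [hfc, List.foldl_cons, List.foldl_cons, hadd, ih]
    · have hfx : q x = false := Bool.eq_false_iff.mpr hq
      have hadd : (PySem.Set.add s x).filter q = s.filter q := by
        by_cases hm : x ∈ s
        · simp [PySem.Set.add, hm]
        · simp [PySem.Set.add, hm, List.filter_append, hfx]
      have hfc : (x :: l).filter q = l.filter q := by simp [hfx]
      rw [hfc, List.foldl_cons, ← ih (s.add x), hadd]

theorem pvDedup_filter (q : String → Bool) (l : List String) :
    PySem.List.dedup (l.filter q) = (PySem.List.dedup l).filter q := by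
  have := pvFoldl_add_filter q l []
  simpa [PySem.List.dedup_eq_ofList, PySem.Set.ofList_eq_foldl] using this

theorem pvStepA_nodup (d : PySem.Dict String String) (k : String) (h : d.keys.Nodup) :
    (pvStepA d k).keys.Nodup := by
  unfold pvStepA; split_ifs <;> exact PySem.Dict.nodup_keys_insert _ _ _ h

theorem pvStepB_nodup (P : List String) (d : PySem.Dict String String) (p : String) (h : d.keys.Nodup) :
    (pvStepB P d p).keys.Nodup := by
  unfold pvStepB; split_ifs <;> exact PySem.Dict.nodup_keys_insert _ _ _ h

theorem pvNotContains_of_mem_items (d : PySem.Dict String String) (kv : String × String)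
    (hm : kv ∈ d.items) (hc : d.contains kv.1 = false) : False := by
  have := PySem.Dict.mem_keys_of_mem_items d hm
  rw [← PySem.Dict.contains_iff_mem_keys] at this
  rw [hc] at this; exact Bool.false_ne_true this

theorem pvCount_cons_self (p : String) (P' : List String) :
    List.count p (p :: P') = List.count p P' + 1 := by
  simp [List.count_cons]

theorem pvCount_cons_ne (x p : String) (P' : List String) (h : x ≠ p) :
    List.count x (p :: P') = List.count x P' := by
  simp [List.count_cons, show (p == x) = false by simp [Ne.symm h]]

theorem pvFoldA_items (P : List String) (d : PySem.Dict String String) (hnd : d.keys.Nodup) :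
    (P.foldl pvStepA d).items = pvF P d := by
  induction P generalizing d with
  | nil =>
    simp [pvF, pvRep_zero, pvAppend_empty]
  | cons p P' ih =>
    rw [List.foldl_cons, ih _ (pvStepA_nodup d p hnd)]
    unfold pvF pvStepA
    by_cases hc : d.contains p = true
    · rw [if_pos hc]
      rw [PySem.Dict.items_insert_of_contains d _ hc, List.map_map]
      congr 1
      · apply List.map_congr_left
        intro kv hkv
        by_cases hk : kv.1 = p
        · have hkv' : (p, kv.2) ∈ d.items := by rw [← hk]; exact hkv
          have hg : d.getD p "" = kv.2 := PySem.Dict.getD_of_mem_items d hkv' hnd ""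
          simp [hk, hg, pvCount_cons_self, pvRep_succ, String.append_assoc]
        · simp [hk, pvCount_cons_ne kv.1 p P' hk]
      · have hfil : (p :: P').filter (fun q => !(d.contains q)) = P'.filter (fun q => !(d.contains q)) := by
          simp [List.filter_cons, hc]
        have hfil2 : P'.filter (fun q => !((d.insert p (d.getD p "" ++ ",AzkabanExecutorServer")).contains q))
            = P'.filter (fun q => !(d.contains q)) := by
          apply List.filter_congr
          intro q _
          rw [PySem.Dict.contains_insert]
          by_cases hq : q = p
          · subst hq; simp [hc]
          · simp [hq]
        rw [hfil, hfil2]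
        apply List.map_congr_left
        intro q hq
        rw [PySem.List.mem_dedup] at hq
        have hqc := (List.mem_filter.mp hq).2
        have hqp : q ≠ p := by
          intro h; subst h; rw [hc] at hqc; simp at hqc
        rw [pvCount_cons_ne q p P' hqp]
    · have hcf : d.contains p = false := Bool.eq_false_iff.mpr hc
      rw [if_neg hc]
      rw [PySem.Dict.items_insert_of_not_contains d _ hcf]
      have hfil : (p :: P').filter (fun q => !(d.contains q))
          = p :: P'.filter (fun q => !(d.contains q)) := by
        simp [List.filter_cons, hcf]
      have hfil2 : P'.filter (fun q => !((d.insert p "AzkabanExecutorServer").contains q))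
          = (P'.filter (fun q => !(d.contains q))).filter (fun x => x != p) := by
        rw [List.filter_filter]
        apply List.filter_congr
        intro q _
        rw [PySem.Dict.contains_insert]
        by_cases hq : q = p
        · subst hq; simp
        · simp [hq, bne]
      rw [hfil, pvDedup_cons, hfil2]
      simp only [List.map_append, List.map_cons, List.map_nil, List.append_assoc,
        List.singleton_append, List.nil_append]
      congr 1
      · apply List.map_congr_left
        intro kv hkv
        have hk : kv.1 ≠ p := fun h => pvNotContains_of_mem_items d kv hkv (h ▸ hcf)
        rw [pvCount_cons_ne kv.1 p P' hk]
      · congr 1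
        · rw [pvCount_cons_self]; simp
        · apply List.map_congr_left
          intro q hq
          rw [PySem.List.mem_dedup, List.mem_filter, List.mem_filter] at hq
          have hqp : q ≠ p := by
            have := hq.2; intro h; subst h; simp at this
          rw [pvCount_cons_ne q p P' hqp]

theorem pvFoldB_items (P : List String) (L : List String) (d : PySem.Dict String String)
    (hL : L.Nodup) (hnd : d.keys.Nodup) :
    (L.foldl (pvStepB P) d).items
      = d.items.map (fun kv => (kv.1, kv.2 ++ if kv.1 ∈ L then pvRep (P.count kv.1) else ""))
        ++ (L.filter (fun p => !(d.contains p))).map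
             (fun p => (p, PySem.Str.join "," (List.replicate (P.count p) "AzkabanExecutorServer"))) := by
  induction L generalizing d with
  | nil =>
    simp [pvAppend_empty]
  | cons p L' ih =>
    have hpL : p ∉ L' := (List.nodup_cons.mp hL).1
    have hL' : L'.Nodup := (List.nodup_cons.mp hL).2
    rw [List.foldl_cons, ih _ hL' (pvStepB_nodup P d p hnd)]
    unfold pvStepB
    by_cases hc : d.contains p = true
    · rw [if_pos hc]
      rw [PySem.Dict.items_insert_of_contains d _ hc, List.map_map]
      congr 1
      · apply List.map_congr_left
        intro kv hkv
        by_cases hk : kv.1 = p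
        · have hkv' : (p, kv.2) ∈ d.items := by rw [← hk]; exact hkv
          have hg : d.getD p "" = kv.2 := PySem.Dict.getD_of_mem_items d hkv' hnd ""
          simp [hk, hg, hpL, pvAppend_empty]
        · simp [List.mem_cons, hk]
      · have hfil : (p :: L').filter (fun q => !(d.contains q)) = L'.filter (fun q => !(d.contains q)) := by
          simp [List.filter_cons, hc]
        have hfil2 : L'.filter (fun q => !((d.insert p (d.getD p "" ++ pvRep (P.count p))).contains q))
            = L'.filter (fun q => !(d.contains q)) := by
          apply List.filter_congr
          intro q hq
          rw [PySem.Dict.contains_insert]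
          have hqp : q ≠ p := fun h => hpL (h ▸ hq)
          simp [hqp]
        rw [hfil, hfil2]
    · have hcf : d.contains p = false := Bool.eq_false_iff.mpr hc
      rw [if_neg hc]
      rw [PySem.Dict.items_insert_of_not_contains d _ hcf]
      have hfil : (p :: L').filter (fun q => !(d.contains q))
          = p :: L'.filter (fun q => !(d.contains q)) := by
        simp [List.filter_cons, hcf]
      have hfil2 : L'.filter (fun q => !((d.insert p (PySem.Str.join "," (List.replicate (P.count p) "AzkabanExecutorServer"))).contains q))
          = L'.filter (fun q => !(d.contains q)) := by
        apply List.filter_congr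
        intro q hq
        rw [PySem.Dict.contains_insert]
        have hqp : q ≠ p := fun h => hpL (h ▸ hq)
        simp [hqp]
      rw [hfil, hfil2]
      simp only [List.map_append, List.map_cons, List.map_nil, List.append_assoc,
        List.singleton_append, List.nil_append]
      congr 1
      · apply List.map_congr_left
        intro kv hkv
        have hk : kv.1 ≠ p := fun h => pvNotContains_of_mem_items d kv hkv (h ▸ hcf)
        simp [List.mem_cons, hk]
      · congr 1
        simp [hpL, pvAppend_empty]

theorem pvB_eq_F (P : List String) (d : PySem.Dict String String) (hnd : d.keys.Nodup) :
    ((P.foldl (fun c p => c.insert p (c.getD p 0 + 1)) (PySem.Dict.empty : PySem.Dict String Int)).items.foldl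
        pvStepB2 d).items = pvF P d := by
  rw [PySem.Dict.foldl_insert_getD_add_one_eq_counter, PySem.Dict.items_counter,
    List.foldl_map (f := fun k => (k, (P.count k : Int))) (g := pvStepB2)]
  have hfun : (fun (d : PySem.Dict String String) (k : String) => pvStepB2 d (k, (P.count k : Int)))
      = pvStepB P := by
    funext d k
    simp [pvStepB2, pvStepB]
  rw [hfun, ← PySem.List.dedup_eq_ofList]
  rw [pvFoldB_items P (PySem.List.dedup P) d (PySem.List.nodup_dedup P) hnd]
  unfold pvF
  congr 1
  · apply List.map_congr_left
    intro kv _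
    by_cases hm : kv.1 ∈ PySem.List.dedup P
    · rw [if_pos hm]
    · have hnp : kv.1 ∉ P := fun h => hm ((PySem.List.mem_dedup P kv.1).mpr h)
      have hz : P.count kv.1 = 0 := List.count_eq_zero.mpr hnp
      rw [if_neg hm, hz, pvRep_zero]
  · rw [pvDedup_filter]
    apply List.map_congr_left
    intro q hq
    rw [List.mem_filter] at hq
    have hqP : q ∈ P := ((PySem.List.mem_dedup P q).mp hq.1)
    have hpos : 0 < P.count q := List.count_pos_iff.mpr hqP
    obtain ⟨n, hn⟩ : ∃ n, P.count q = n + 1 := ⟨P.count q - 1, by omega⟩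
    rw [hn, pvJoinC_succ]
    simp

-- ===== VERDICT (by name: the statement is the Claim_ definition above) =====
theorem getExe_spec : Claim_equal_getExe := by
  intro keys dicts _
  unfold Spec_getExe getExe getExe_alt
  rw [← List.foldl_map (f := pvPrefix) (g := pvStepA),
      ← List.foldl_map (f := pvPrefix) (g := fun c p => PySem.Dict.insert c p (c.getD p 0 + 1)),
      pvFoldA_items _ _ (PySem.Dict.nodup_keys_ofList dicts),
      pvB_eq_F _ _ (PySem.Dict.nodup_keys_ofList dicts)]
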